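-- pv_equiv track=rewrite | github.com/chestnova123/tei_ner | tune_thresholds_per_type.py | bilou_to_spans
-- ===== SOURCE A (Python) =====
-- def bilou_to_spans(tags):
--     """
--     tags: list[str]
--     Returns list of (start, end_exclusive, TYPE) spans in token indices.
--     Strict BILOU decoding:
--       - U-TYPE => single-token entity
--       - B-TYPE ... I-TYPE ... L-TYPE => multi-token entity
--       - malformed sequences are ignored (do not form spans)
--     """
--     spans = []
--     i = 0
--     n = len(tags)
--     while i < n:
--         t = tags[i]
--         if t == "O":
--             i += 1
--             continue
--
--         if t.startswith("U-"):
--             spans.append((i, i + 1, t[2:]))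
--             i += 1
--             continue
--
--         if t.startswith("B-"):
--             ent_type = t[2:]
--             j = i + 1
--             while j < n and tags[j] == f"I-{ent_type}":
--                 j += 1
--             if j < n and tags[j] == f"L-{ent_type}":
--                 spans.append((i, j + 1, ent_type))
--                 i = j + 1
--             else:
--                 # malformed: skip just the B token
--                 i += 1
--             continue
--
--         # I- or L- without valid start => skip
--         i += 1
--
--     return spans
-- ===== SOURCE B (Python) =====
-- def bilou_to_spans(tags):
--     """Single-pass state machine: maintain at most one open entity (start, type)."""
--     spans = []
--     open_ent = None  # (start_index, type) of the currently open B- entity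
--     for i, t in enumerate(tags):
--         if open_ent is not None:
--             start, ty = open_ent
--             if t == "I-" + ty:
--                 continue
--             if t == "L-" + ty:
--                 spans.append((start, i + 1, ty))
--                 open_ent = None
--                 continue
--             open_ent = None  # malformed: discard and re-handle t as if closed
--         if t == "O":
--             continue
--         if t.startswith("U-"):
--             spans.append((i, i + 1, t[2:]))
--         elif t.startswith("B-"):
--             open_ent = (i, t[2:])
--         # stray I-/L-: ignore
--     return spans
-- ===== Notes on version B (the rewrite author's own statement) =====
-- stated objective: alternative
-- what changed: Replaced A's outer index loop with an inner lookahead scan (re-scanning I- tokens after malformed B- sequences) by a single left-to-right state-machine fold that keeps the currently open entity as (start, type) state and emits spans incrementally.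
import Mathlib
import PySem

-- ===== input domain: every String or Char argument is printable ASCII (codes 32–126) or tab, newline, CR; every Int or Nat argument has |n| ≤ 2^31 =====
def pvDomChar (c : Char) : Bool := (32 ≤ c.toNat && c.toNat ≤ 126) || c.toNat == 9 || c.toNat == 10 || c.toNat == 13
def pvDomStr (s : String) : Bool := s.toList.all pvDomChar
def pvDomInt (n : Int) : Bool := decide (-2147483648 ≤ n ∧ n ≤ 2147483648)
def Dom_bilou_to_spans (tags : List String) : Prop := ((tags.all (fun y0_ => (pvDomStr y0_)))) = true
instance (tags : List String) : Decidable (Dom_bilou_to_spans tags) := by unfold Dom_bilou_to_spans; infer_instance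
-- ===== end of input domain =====

-- B replaces A's inner lookahead scan by a single left-to-right pass that maintains
-- the currently open entity as explicit state (objective: simpler one-pass decomposition).

-- ===== PORT A =====
-- inner 'while j < n and tags[j] == f"I-{ent_type}"' loop of A
def bilouScan (tags : List String) (ty : String) (j : Nat) : Nat :=
  if j < tags.length ∧ tags.getD j "" = "I-" ++ ty then bilouScan tags ty (j + 1) else j
termination_by tags.length - j
decreasing_by omega

-- termination helper for the outer loop (i jumps to j+1 after a closed entity)
theorem bilouScan_ge (tags : List String) (ty : String) (j : Nat) : j ≤ bilouScan tags ty j := by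
  unfold bilouScan
  split
  · exact le_trans (by omega) (bilouScan_ge tags ty (j + 1))
  · exact le_refl j
termination_by tags.length - j
decreasing_by omega

-- A's outer 'while i < n' loop; 'spans' is the accumulated list, t[2:] is PySem.Str.slice
def bilouGo (tags : List String) (i : Nat) (spans : List (Int × Int × String)) :
    List (Int × Int × String) :=
  if hi : i < tags.length then
    let t := tags.getD i ""
    if t = "O" then bilouGo tags (i + 1) spans
    else if PySem.Str.startswith t "U-" then
      bilouGo tags (i + 1) (spans ++ [((i : Int), (i : Int) + 1, PySem.Str.slice t (some 2) none)])
    else if PySem.Str.startswith t "B-" then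
      let ty := PySem.Str.slice t (some 2) none
      let j := bilouScan tags ty (i + 1)
      if j < tags.length ∧ tags.getD j "" = "L-" ++ ty then
        bilouGo tags (j + 1) (spans ++ [((i : Int), (j : Int) + 1, ty)])
      else bilouGo tags (i + 1) spans
    else bilouGo tags (i + 1) spans
  else spans
termination_by tags.length - i
decreasing_by
  · omega
  · omega
  · have := bilouScan_ge tags (PySem.Str.slice (tags.getD i "") (some 2) none) (i + 1)
    omega
  · omega
  · omega

def bilou_to_spans (tags : List String) : List (Int × Int × String) := bilouGo tags 0 []

-- ===== PORT B =====
-- handling of a token when no entity is open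
def bilouClosed (spans : List (Int × Int × String)) (i : Int) (t : String) :
    List (Int × Int × String) × Option (Int × String) :=
  if t = "O" then (spans, none)
  else if PySem.Str.startswith t "U-" then
    (spans ++ [(i, i + 1, PySem.Str.slice t (some 2) none)], none)
  else if PySem.Str.startswith t "B-" then
    (spans, some (i, PySem.Str.slice t (some 2) none))
  else (spans, none)

-- one step of the state machine: state = (spans so far, open entity)
def bilouStep (st : List (Int × Int × String) × Option (Int × String)) (p : Int × String) :
    List (Int × Int × String) × Option (Int × String) :=
  match st.2 with
  | some (s, ty) =>
    if p.2 = "I-" ++ ty then st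
    else if p.2 = "L-" ++ ty then (st.1 ++ [(s, p.1 + 1, ty)], none)
    else bilouClosed st.1 p.1 p.2
  | none => bilouClosed st.1 p.1 p.2

def bilou_to_spans_alt (tags : List String) : List (Int × Int × String) :=
  ((PySem.List.enumerate tags 0).foldl bilouStep ([], none)).1

-- ===== PRECONDITION & SPEC =====
def Spec_bilou_to_spans (tags : List String) (out : List (Int × Int × String)) : Prop := out = bilou_to_spans_alt tags
instance (tags : List String) (out : List (Int × Int × String)) : Decidable (Spec_bilou_to_spans tags out) := by unfold Spec_bilou_to_spans; infer_instance

-- ===== CLAIM (what is proved, stated in full; the proofs are below) =====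
def Claim_equal_bilou_to_spans : Prop := ∀ (tags : List String), Dom_bilou_to_spans tags → Spec_bilou_to_spans tags (bilou_to_spans tags)

-- ===== LEMMAS AND PROOFS =====

theorem bilou_drop_cons (tags : List String) (i : Nat) (h : i < tags.length) :
    tags.drop i = tags.getD i "" :: tags.drop (i + 1) := by
  rw [List.drop_eq_getElem_cons h, List.getD_eq_getElem tags "" h]

-- "I-" ++ ty is never "O", never starts with "U-" or "B-"
theorem bilou_Ity_ne_O (ty : String) : ("I-" ++ ty = "O") = False := by
  simp only [eq_iff_iff, iff_false]
  intro h
  have : ("I-" ++ ty).toList = "O".toList := by rw [h]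
  simp at this
theorem bilou_Ity_not_U (ty : String) : PySem.Str.startswith ("I-" ++ ty) "U-" = false := by
  rw [Bool.eq_false_iff]
  intro h
  have h2 := (PySem.Chars.startswith_iff _ _).mp (by simpa [PySem.Str.startswith] using h)
  simp [List.cons_prefix_cons] at h2
theorem bilou_Ity_not_B (ty : String) : PySem.Str.startswith ("I-" ++ ty) "B-" = false := by
  rw [Bool.eq_false_iff]
  intro h
  have h2 := (PySem.Chars.startswith_iff _ _).mp (by simpa [PySem.Str.startswith] using h)
  simp [List.cons_prefix_cons] at h2

-- A skips a run of stray "I-ty" tokens one by one: bilouGo is unchanged along bilouScan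
theorem bilou_skip (tags : List String) (ty : String) :
    ∀ (m j : Nat) (spans : List (Int × Int × String)), tags.length - j ≤ m →
      bilouGo tags j spans = bilouGo tags (bilouScan tags ty j) spans := by
  intro m
  induction m with
  | zero =>
    intro j spans hm
    rw [bilouScan, if_neg (by omega : ¬(j < tags.length ∧ tags.getD j "" = "I-" ++ ty))]
  | succ m ih =>
    intro j spans hm
    rw [bilouScan]
    by_cases hc : j < tags.length ∧ tags.getD j "" = "I-" ++ ty
    · rw [if_pos hc]
      have hstep : bilouGo tags j spans = bilouGo tags (j + 1) spans := by
        rw [bilouGo]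
        simp only [hc.1, dif_pos, hc.2, bilou_Ity_ne_O, bilou_Ity_not_U, bilou_Ity_not_B]
        simp
      rw [hstep]
      exact ih (j + 1) spans (by omega)
    · rw [if_neg hc]

-- the state machine with an open entity follows A's lookahead scan
theorem bilou_open (tags : List String) (ty : String) :
    ∀ (m j : Nat) (spans : List (Int × Int × String)) (s : Int), tags.length - j ≤ m →
      ((PySem.List.enumerate (tags.drop j) (j : Int)).foldl bilouStep (spans, some (s, ty))).1 =
        (if bilouScan tags ty j < tags.length then
           if tags.getD (bilouScan tags ty j) "" = "L-" ++ ty then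
             ((PySem.List.enumerate (tags.drop (bilouScan tags ty j + 1))
                 ((bilouScan tags ty j : Int) + 1)).foldl bilouStep
               (spans ++ [(s, (bilouScan tags ty j : Int) + 1, ty)], none)).1
           else
             ((PySem.List.enumerate (tags.drop (bilouScan tags ty j))
                 ((bilouScan tags ty j : Int))).foldl bilouStep (spans, none)).1
         else spans) := by
  intro m
  induction m with
  | zero =>
    intro j spans s hm
    have hj : ¬ j < tags.length := by omega
    have hscan : bilouScan tags ty j = j := by
      rw [bilouScan, if_neg (by omega : ¬(j < tags.length ∧ tags.getD j "" = "I-" ++ ty))]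
    rw [hscan, if_neg hj]
    simp [List.drop_eq_nil_of_le (by omega : tags.length ≤ j)]
  | succ m ih =>
    intro j spans s hm
    by_cases hj : j < tags.length
    · rw [bilou_drop_cons tags j hj, PySem.List.enumerate_cons]
      by_cases hI : tags.getD j "" = "I-" ++ ty
      · have hscan : bilouScan tags ty j = bilouScan tags ty (j + 1) := by
          rw [bilouScan, if_pos ⟨hj, hI⟩]
        have hstate : bilouStep (spans, some (s, ty)) ((j : Int), tags.getD j "") =
            (spans, some (s, ty)) := by
          simp only [bilouStep]; rw [if_pos hI]
        rw [List.foldl_cons, hstate, hscan]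
        have hcast : ((j : Int) + 1) = (((j + 1 : Nat) : Int)) := by push_cast; ring
        rw [hcast]
        exact ih (j + 1) spans s (by omega)
      · have hscan : bilouScan tags ty j = j := by
          rw [bilouScan, if_neg (by rintro ⟨-, h2⟩; exact hI h2)]
        rw [hscan, if_pos hj]
        by_cases hL : tags.getD j "" = "L-" ++ ty
        · rw [if_pos hL]
          have hstate : bilouStep (spans, some (s, ty)) ((j : Int), tags.getD j "") =
              (spans ++ [(s, (j : Int) + 1, ty)], none) := by
            simp only [bilouStep]; rw [if_neg hI, if_pos hL]
          rw [List.foldl_cons, hstate]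
        · rw [if_neg hL]
          have hstate : bilouStep (spans, some (s, ty)) ((j : Int), tags.getD j "") =
              bilouClosed spans (j : Int) (tags.getD j "") := by
            simp only [bilouStep]; rw [if_neg hI, if_neg hL]
          rw [List.foldl_cons, hstate,
            bilou_drop_cons tags j hj, PySem.List.enumerate_cons, List.foldl_cons]
          rfl
    · have hscan : bilouScan tags ty j = j := by
        rw [bilouScan, if_neg (by omega : ¬(j < tags.length ∧ tags.getD j "" = "I-" ++ ty))]
      rw [hscan, if_neg hj]
      simp [List.drop_eq_nil_of_le (by omega : tags.length ≤ j)]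

-- main: from position i with no open entity, B's fold computes A's loop
theorem bilou_closed (tags : List String) :
    ∀ (m i : Nat) (spans : List (Int × Int × String)), tags.length - i ≤ m →
      ((PySem.List.enumerate (tags.drop i) (i : Int)).foldl bilouStep (spans, none)).1 =
        bilouGo tags i spans := by
  intro m
  induction m with
  | zero =>
    intro i spans hm
    have hi : ¬ i < tags.length := by omega
    rw [bilouGo, dif_neg hi]
    simp [List.drop_eq_nil_of_le (by omega : tags.length ≤ i)]
  | succ m ih =>
    intro i spans hm
    by_cases hi : i < tags.length
    · rw [bilou_drop_cons tags i hi, PySem.List.enumerate_cons, List.foldl_cons]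
      rw [bilouGo]
      simp only [hi, dif_pos]
      have hcast : ((i : Int) + 1) = (((i + 1 : Nat) : Int)) := by push_cast; ring
      by_cases hO : tags.getD i "" = "O"
      · rw [if_pos hO]
        have hstate : bilouStep (spans, none) ((i : Int), tags.getD i "") = (spans, none) := by
          simp only [bilouStep, bilouClosed]; rw [if_pos hO]
        rw [hstate, hcast]
        exact ih (i + 1) spans (by omega)
      · rw [if_neg hO]
        by_cases hU : PySem.Str.startswith (tags.getD i "") "U-" = true
        · rw [if_pos hU]
          have hstate : bilouStep (spans, none) ((i : Int), tags.getD i "") =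
              (spans ++ [((i : Int), (i : Int) + 1,
                PySem.Str.slice (tags.getD i "") (some 2) none)], none) := by
            simp only [bilouStep, bilouClosed]; rw [if_neg hO, if_pos hU]
          rw [hstate, hcast]
          exact ih (i + 1)
            (spans ++ [((i : Int), (i : Int) + 1,
              PySem.Str.slice (tags.getD i "") (some 2) none)]) (by omega)
        · rw [if_neg hU]
          by_cases hB : PySem.Str.startswith (tags.getD i "") "B-" = true
          · rw [if_pos hB]
            have hstate : bilouStep (spans, none) ((i : Int), tags.getD i "") =
                (spans, some ((i : Int),
                  PySem.Str.slice (tags.getD i "") (some 2) none)) := by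
              simp only [bilouStep, bilouClosed]; rw [if_neg hO, if_neg hU, if_pos hB]
            rw [hstate, hcast]
            have hty : PySem.Str.slice (tags.getD i "") (some 2) none =
              PySem.Str.slice (tags.getD i "") (some 2) none := rfl
            have hki : i + 1 ≤ bilouScan tags
                (PySem.Str.slice (tags.getD i "") (some 2) none) (i + 1) :=
              bilouScan_ge tags _ (i + 1)
            rw [bilou_open tags (PySem.Str.slice (tags.getD i "") (some 2) none) m (i + 1)
              spans (i : Int) (by omega)]
            set ty := PySem.Str.slice (tags.getD i "") (some 2) none with htydef
            set k := bilouScan tags ty (i + 1) with hkdef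
            by_cases hkn : k < tags.length
            · rw [if_pos hkn]
              by_cases hkL : tags.getD k "" = "L-" ++ ty
              · rw [if_pos hkL, if_pos ⟨hkn, hkL⟩]
                have hcast2 : ((k : Int) + 1) = (((k + 1 : Nat) : Int)) := by push_cast; ring
                rw [hcast2]
                exact ih (k + 1) (spans ++ [((i : Int), ((k + 1 : Nat) : Int), ty)]) (by omega)
              · rw [if_neg hkL, if_neg (fun hc => hkL hc.2)]
                rw [ih k spans (by omega)]
                have := bilou_skip tags ty m (i + 1) spans (by omega)
                rw [← hkdef] at this
                exact this.symm
            · rw [if_neg hkn, if_neg (fun hc => hkn hc.1)]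
              have h1 : bilouGo tags (i + 1) spans = bilouGo tags k spans := by
                have := bilou_skip tags ty m (i + 1) spans (by omega)
                rw [← hkdef] at this
                exact this
              have h2 : bilouGo tags k spans = spans := by
                rw [bilouGo, dif_neg hkn]
              rw [h1, h2]
          · rw [if_neg hB]
            have hstate : bilouStep (spans, none) ((i : Int), tags.getD i "") =
                (spans, none) := by
              simp only [bilouStep, bilouClosed]; rw [if_neg hO, if_neg hU, if_neg hB]
            rw [hstate, hcast]
            exact ih (i + 1) spans (by omega)
    · rw [bilouGo, dif_neg hi]
      simp [List.drop_eq_nil_of_le (by omega : tags.length ≤ i)]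

-- ===== VERDICT (by name: the statement is the Claim_ definition above) =====
theorem bilou_to_spans_spec : Claim_equal_bilou_to_spans := by
  intro tags _
  unfold Spec_bilou_to_spans bilou_to_spans bilou_to_spans_alt
  have := bilou_closed tags tags.length 0 [] (by omega)
  simpa using this.symm
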